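-- pv_equiv track=rewrite | github.com/No-ONEEEEE/AAD-Washi-O-Washi | Web_application/AAD web_application/algorithms/approximate_matching.py | _create_pattern_mask
-- ===== SOURCE A (Python) =====
-- from typing import List, Dict, Tuple, Optional
--
-- def _create_pattern_mask(pattern: str) -> Dict[str, int]:
--     """
--     Create bit mask for each character in the pattern.
--
--     Args:
--         pattern: The pattern to create masks for
--
--     Returns:
--         Dictionary mapping characters to their bit masks
--     """
--     masks = {}
--     m = len(pattern)
--
--     # Initialize all masks to have all bits set
--     alphabet = set(pattern)
--     for char in alphabet:
--         masks[char] = (1 << m) - 1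
--
--     # Set appropriate bits for each character
--     for i, char in enumerate(pattern):
--         masks[char] &= ~(1 << i)
--
--     return masks
-- ===== SOURCE B (Python) =====
-- def _create_pattern_mask(pattern: str):
--     # For each distinct character, scan the pattern and subtract the total
--     # positional weight sum(2^i over positions of that character) from the
--     # all-ones value: pure arithmetic, no bitwise clearing, no dict mutation.
--     m = len(pattern)
--     full = (1 << m) - 1
--     return {c: full - sum(1 << i for i, ch in enumerate(pattern) if ch == c)
--             for c in set(pattern)}
-- ===== Notes on version B (the rewrite author's own statement) =====
-- stated objective: alternative
-- what changed: A builds a dict of all-ones masks and destructively clears bits via a per-position dict lookup-and-update with big-int AND-NOT; B never mutates a dict: for each distinct character it scans the pattern, sums that character's positional weights 2^i arithmetically, and subtracts the sum from (1<<m)-1 (correct because the cleared bits are distinct powers of two, so AND-NOT from all-ones equals subtraction).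
import Mathlib
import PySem

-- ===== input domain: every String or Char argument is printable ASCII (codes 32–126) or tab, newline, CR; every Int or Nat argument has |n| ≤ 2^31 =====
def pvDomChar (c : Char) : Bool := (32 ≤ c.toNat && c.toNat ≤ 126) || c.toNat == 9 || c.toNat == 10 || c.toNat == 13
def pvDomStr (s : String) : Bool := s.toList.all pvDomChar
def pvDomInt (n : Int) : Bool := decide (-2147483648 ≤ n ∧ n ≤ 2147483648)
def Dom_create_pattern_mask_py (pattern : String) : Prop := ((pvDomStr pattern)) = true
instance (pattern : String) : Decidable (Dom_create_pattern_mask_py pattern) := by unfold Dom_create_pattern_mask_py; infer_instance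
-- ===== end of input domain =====

-- B replaces A's fill-all-ones-then-clear-bits dict-mutating strategy by per-character
-- arithmetic: for each distinct character it sums that character's positional weights 2^i
-- and subtracts the sum from (1<<m)-1 (objective: alternative; return value only —
-- Python A iterates set(pattern) in hash order, the dict output is compared ignoring order).

-- ===== PORT A =====
-- 1 << i for the nonnegative enumerate index i (shared helper for both ports)
def pvBit (i : Int) : Int := (1 : Int) <<< i.toNat

-- alphabet = set(pattern) is iterated in first-occurrence order (Python: hash order; the
-- returned dict is compared ignoring order); masks[char] &= ~(1 << i) is 'modify' with
-- default 0 — exact, since every key of pattern is present after the first loop.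
def create_pattern_mask_py (pattern : String) : List (String × Int) :=
  ((PySem.List.enumerate pattern.toList).foldl
      (fun d p => d.modify (String.singleton p.2) 0
        (fun v => PySem.Int.band v (Int.not (pvBit p.1))))
      ((PySem.Set.ofList pattern.toList).foldl
        (fun d c => d.insert (String.singleton c) (((1 : Int) <<< pattern.toList.length) - 1))
        PySem.Dict.empty)).items

-- ===== PORT B =====
-- the dict comprehension over set(pattern); sum(1 << i for i, ch in enumerate(pattern)
-- if ch == c) is the sum of the filtered-then-mapped enumerate list.
def create_pattern_mask_py_alt (pattern : String) : List (String × Int) :=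
  (PySem.Set.ofList pattern.toList).map (fun c =>
    (String.singleton c,
      (((1 : Int) <<< pattern.toList.length) - 1) -
        (((PySem.List.enumerate pattern.toList).filter (fun p => p.2 == c)).map
            (fun p => pvBit p.1)).sum))

-- ===== PRECONDITION & SPEC =====
def Spec_create_pattern_mask_py (pattern : String) (out : List (String × Int)) : Prop := out = create_pattern_mask_py_alt pattern
instance (pattern : String) (out : List (String × Int)) : Decidable (Spec_create_pattern_mask_py pattern out) := by unfold Spec_create_pattern_mask_py; infer_instance

-- ===== CLAIM (what is proved, stated in full; the proofs are below) =====
def Claim_equal_create_pattern_mask_py : Prop := ∀ (pattern : String), Dom_create_pattern_mask_py pattern → Spec_create_pattern_mask_py pattern (create_pattern_mask_py pattern)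

-- ===== LEMMAS AND PROOFS =====
theorem nat_and_add_ldiff (n : Nat) : ∀ m, (n &&& m) + n.ldiff m = n := by
  induction n using Nat.binaryRec with
  | zero =>
    intro m
    apply Nat.eq_of_testBit_eq
    intro i
    simp [Nat.testBit_ldiff]
  | bit b n ih =>
    intro m
    rw [show m = Nat.bit (m.testBit 0) (m >>> 1) from (Nat.bit_testBit_zero_shiftRight_one m).symm,
        Nat.land_bit, Nat.ldiff_bit]
    have h := ih (m >>> 1)
    cases b <;> cases (m.testBit 0) <;> simp [Nat.bit_val] <;> omega

theorem nat_sub_and (n m : Nat) : n - (n &&& m) = n.ldiff m := by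
  have := nat_and_add_ldiff n m; omega

theorem band_not_nonneg (a x : Int) (ha : 0 ≤ a) (hx : 0 ≤ x) :
    PySem.Int.band a (Int.not x) = ((a.toNat.ldiff x.toNat : Nat) : Int) := by
  obtain ⟨A, rfl⟩ := Int.eq_ofNat_of_zero_le ha
  obtain ⟨X, rfl⟩ := Int.eq_ofNat_of_zero_le hx
  show PySem.Int.band (Int.ofNat A) (Int.negSucc X) = _
  simp [PySem.Int.band, nat_sub_and]

theorem singleton_inj {a b : Char} (h : String.singleton a = String.singleton b) : a = b := by
  simpa [String.singleton, String.ext_iff] using h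

theorem getD_modloop (l : List (Int × Char)) :
    ∀ (d : PySem.Dict String Int) (c : Char),
    (l.foldl (fun d p => d.modify (String.singleton p.2) 0
        (fun v => PySem.Int.band v (Int.not (pvBit p.1)))) d).getD (String.singleton c) 0
    = (l.filter (fun p => p.2 == c)).foldl
        (fun v p => PySem.Int.band v (Int.not (pvBit p.1))) (d.getD (String.singleton c) 0) := by
  induction l with
  | nil => intro d c; simp
  | cons p rest ih =>
    intro d c
    by_cases h : p.2 = c
    · subst h
      simp only [List.foldl_cons, List.filter_cons, BEq.rfl, if_true, ih]
      rw [PySem.Dict.getD_modify_self]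
    · have hne : String.singleton c ≠ String.singleton p.2 := fun hh => h (singleton_inj hh).symm
      simp only [List.foldl_cons, List.filter_cons, beq_iff_eq, h, if_false, ih]
      rw [PySem.Dict.getD_modify_of_ne _ _ _ hne]

theorem set_update_subset {α : Type} [BEq α] [LawfulBEq α] (xs : List α) :
    ∀ s : PySem.Set α, (∀ x ∈ xs, x ∈ s) → PySem.Set.update s xs = s := by
  induction xs with
  | nil => intro s _; rfl
  | cons x rest ih =>
    intro s h
    have hx : x ∈ s := h x (by simp)
    have : PySem.Set.add s x = s := by
      simp [PySem.Set.add, PySem.Set.contains, hx]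
    show List.foldl PySem.Set.add s (x :: rest) = s
    simp only [List.foldl_cons, this]
    exact ih s (fun y hy => h y (by simp [hy]))

theorem pvBit_eq_pow (i : Int) : pvBit i = ((2 ^ i.toNat : Nat) : Int) := by
  unfold pvBit
  rw [Int.shiftLeft_eq]
  push_cast
  ring

-- the heart: clearing a list of DISTINCT bits, all set in the start value, is subtraction
theorem fold_clear_eq_sub (F : List (Int × Char)) :
    ∀ a : Nat,
      (∀ p ∈ F, 0 ≤ p.1) →
      (F.map (fun p => p.1.toNat)).Pairwise (· < ·) →
      (∀ p ∈ F, a.testBit p.1.toNat = true) →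
      F.foldl (fun v p => PySem.Int.band v (Int.not (pvBit p.1))) ((a : Nat) : Int)
        = (a : Int) - (F.map (fun p => pvBit p.1)).sum := by
  induction F with
  | nil => intro a _ _ _; simp
  | cons p rest ih =>
    intro a hpos hnd ha
    have hp0 : 0 ≤ p.1 := hpos p (by simp)
    have hbit : a.testBit p.1.toNat = true := ha p (by simp)
    have hand : a &&& 2 ^ p.1.toNat = 2 ^ p.1.toNat := by
      rw [Nat.and_two_pow, hbit]; simp
    have hle : 2 ^ p.1.toNat ≤ a := hand ▸ Nat.and_le_left
    have hld : a.ldiff (2 ^ p.1.toNat) = a - 2 ^ p.1.toNat := by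
      rw [← nat_sub_and, hand]
    simp only [List.foldl_cons, List.map_cons, List.sum_cons]
    rw [band_not_nonneg _ _ (Int.natCast_nonneg a) (by
        rw [pvBit_eq_pow]; exact Int.natCast_nonneg _)]
    rw [pvBit_eq_pow p.1]
    simp only [Int.toNat_natCast]
    rw [hld]
    have hrest_nd : (rest.map (fun p => p.1.toNat)).Pairwise (· < ·) :=
      (List.pairwise_cons.1 hnd).2
    have hhead : ∀ q ∈ rest, p.1.toNat < q.1.toNat := by
      intro q hq
      exact (List.pairwise_cons.1 hnd).1 _ (List.mem_map_of_mem hq)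
    have hrest_bit : ∀ q ∈ rest, (a - 2 ^ p.1.toNat).testBit q.1.toNat = true := by
      intro q hq
      rw [← hld, Nat.testBit_ldiff, Nat.testBit_two_pow]
      have hne : p.1.toNat ≠ q.1.toNat := Nat.ne_of_lt (hhead q hq)
      simp [ha q (by simp [hq]), hne]
    rw [ih (a - 2 ^ p.1.toNat) (fun q hq => hpos q (by simp [hq])) hrest_nd hrest_bit]
    have : ((a - 2 ^ p.1.toNat : Nat) : Int) = (a : Int) - ((2 ^ p.1.toNat : Nat) : Int) := by
      omega
    rw [this]
    ring

theorem main_thm (pattern : String) :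
    create_pattern_mask_py pattern = create_pattern_mask_py_alt pattern := by
  unfold create_pattern_mask_py create_pattern_mask_py_alt
  set cs := pattern.toList with hcs
  set l := PySem.List.enumerate cs 0 with hl
  set S := PySem.Set.ofList cs with hS
  set full : Int := ((1 : Int) <<< cs.length) - 1 with hfull
  have hsinj : Function.Injective String.singleton := fun a b h => singleton_inj h
  have hSnodup : S.Nodup := PySem.Set.nodup_ofList cs
  have hKnodup : (S.map String.singleton).Nodup := hSnodup.map hsinj
  set init : PySem.Dict String Int :=
    S.foldl (fun d c => d.insert (String.singleton c) full) PySem.Dict.empty with hinit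
  set final : PySem.Dict String Int :=
    l.foldl (fun d p => d.modify (String.singleton p.2) 0
      (fun v => PySem.Int.band v (Int.not (pvBit p.1)))) init with hfinal
  -- init facts
  have hinit_items : init.items = S.map (fun c => (String.singleton c, full)) := by
    rw [hinit, PySem.Dict.items_foldl_insert_fresh S String.singleton (fun _ => full)
      PySem.Dict.empty (by intro a _; simp) hKnodup]
    simp [PySem.Dict.empty]
  have hinit_keys : init.keys = S.map String.singleton := by
    rw [hinit, PySem.Dict.keys_foldl_insert_key]
    simp only [PySem.Dict.keys_empty, PySem.Set.update_nil_left]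
    exact PySem.Set.ofList_eq_self_of_nodup _ hKnodup
  have hinit_nodup : init.keys.Nodup := by rw [hinit_keys]; exact hKnodup
  have hinit_getD : ∀ c ∈ S, init.getD (String.singleton c) 0 = full := by
    intro c hc
    exact PySem.Dict.getD_of_mem_items init
      (by rw [hinit_items]; exact List.mem_map_of_mem hc) hinit_nodup 0
  -- key-list of the loop
  have hlmap : l.map (fun p => String.singleton p.2) = cs.map String.singleton := by
    rw [show (fun (p : Int × Char) => String.singleton p.2)
          = String.singleton ∘ (fun (p : Int × Char) => p.2) from rfl,
        ← List.map_map, hl, PySem.List.map_snd_enumerate]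
  -- final facts
  have hfinal_keys : final.keys = S.map String.singleton := by
    rw [hfinal, PySem.Dict.keys_foldl_modify_key, hlmap, hinit_keys]
    apply set_update_subset
    intro x hx
    obtain ⟨c, hc, rfl⟩ := List.mem_map.1 hx
    exact List.mem_map_of_mem ((PySem.Set.mem_ofList cs c).2 hc)
  have hfinal_nodup : final.keys.Nodup := by rw [hfinal_keys]; exact hKnodup
  rw [PySem.Dict.items_eq_map_keys final hfinal_nodup 0, hfinal_keys, List.map_map]
  apply List.map_congr_left
  intro c hc
  simp only [Function.comp_apply]
  congr 1
  -- pointwise value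
  rw [hfinal, getD_modloop, hinit_getD c hc]
  set F := l.filter (fun p => p.2 == c) with hF
  -- enumerate facts: nonneg increasing indices below cs.length
  have hmem : ∀ p ∈ F, 0 ≤ p.1 ∧ p.1 < (cs.length : Int) := by
    intro p hp
    have hp' : p ∈ l := List.mem_of_mem_filter hp
    obtain ⟨k, hk, rfl⟩ := (PySem.List.mem_enumerate_iff cs 0 p).1 hp'
    refine ⟨by simp, ?_⟩
    simp
    omega
  have hpos : ∀ p ∈ F, 0 ≤ p.1 := fun p hp => (hmem p hp).1
  have hnd : (F.map (fun p => p.1.toNat)).Pairwise (· < ·) := by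
    rw [List.pairwise_map]
    have h1 : l.Pairwise (fun p q => p.1 < q.1) := PySem.List.pairwise_lt_enumerate cs 0
    have h2 : F.Pairwise (fun p q => p.1 < q.1) := h1.filter _
    refine h2.imp_of_mem ?_
    intro p q hp hq hlt
    have := hpos p hp
    omega
  have hfullN : ((2 ^ cs.length - 1 : Nat) : Int) = full := by
    rw [hfull, Int.shiftLeft_eq]
    have h1 : (1 : Nat) ≤ 2 ^ cs.length := Nat.one_le_two_pow
    push_cast [h1]
    ring
  have hbits : ∀ p ∈ F, (2 ^ cs.length - 1 : Nat).testBit p.1.toNat = true := by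
    intro p hp
    rw [Nat.testBit_two_pow_sub_one]
    have := hmem p hp
    simp
    omega
  rw [← hfullN, fold_clear_eq_sub F (2 ^ cs.length - 1) hpos hnd hbits, hfullN]


-- ===== VERDICT (by name: the statement is the Claim_ definition above) =====
theorem create_pattern_mask_py_spec : Claim_equal_create_pattern_mask_py := by
  intro pattern _
  unfold Spec_create_pattern_mask_py
  exact main_thm pattern
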